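-- pv_equiv track=rewrite | github.com/LinusCDE/AdventOfCode2018 | puzzle5.py | react_polymers
-- ===== SOURCE A (Python) =====
-- def react_polymers(polymerList: list) -> int:
--     """
--     Removes polymers of opposite polarity and returns the size.
--     The given list 'polymerList' will get modified!
--     """
--
--     index = 0
--     polymerSize = len(polymerList)  # Should stay same as 'len(polymerList)'
--
--     # Reducing all opposite polarities:
--     while index < (polymerSize-1):
--         if index < 0:
--             index = 0
--
--         # There is no performance difference in using this rather than comparing ord()-values
--         polyA, polyB = polymerList[index], polymerList[index + 1]
--         # Check for opposite polarity:
--         if polyA != polyB and polyA.lower() == polyB.lower():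
--             polymerList.pop(index)
--             polymerList.pop(index)
--             polymerSize -= 2
--             # Go back one before this is removed to check
--             # if a new pair was created that can get removed:
--             index -= 2
--
--         index += 1
--
--     return polymerSize
-- ===== SOURCE B (Python) =====
-- def react_polymers(polymerList: list) -> int:
--     """
--     Removes polymers of opposite polarity and returns the size.
--     Single-pass stack algorithm (does NOT modify the input list).
--     """
--     stack = []
--     for unit in polymerList:
--         if stack and stack[-1] != unit and stack[-1].lower() == unit.lower():
--             stack.pop()
--         else:
--             stack.append(unit)
--     return len(stack)
-- ===== Notes on version B (the rewrite author's own statement) =====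
-- stated objective: simpler
-- what changed: Replaces the index-rewinding while loop with repeated list.pop(i) by a single left-to-right pass maintaining a stack that cancels adjacent opposite-polarity units; B does not mutate the input list.
-- crash fix: A raises IndexError exactly on lists of length >= 2 whose first n-1 units annihilate completely (the final pop leaves one unit with index at -1, and the clamped re-check reads past the end); B returns the correct reduced size 1 there. — e.g. on react_polymers(["a", "A", "x"]): A raises IndexError, B returns 1
import Mathlib
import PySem

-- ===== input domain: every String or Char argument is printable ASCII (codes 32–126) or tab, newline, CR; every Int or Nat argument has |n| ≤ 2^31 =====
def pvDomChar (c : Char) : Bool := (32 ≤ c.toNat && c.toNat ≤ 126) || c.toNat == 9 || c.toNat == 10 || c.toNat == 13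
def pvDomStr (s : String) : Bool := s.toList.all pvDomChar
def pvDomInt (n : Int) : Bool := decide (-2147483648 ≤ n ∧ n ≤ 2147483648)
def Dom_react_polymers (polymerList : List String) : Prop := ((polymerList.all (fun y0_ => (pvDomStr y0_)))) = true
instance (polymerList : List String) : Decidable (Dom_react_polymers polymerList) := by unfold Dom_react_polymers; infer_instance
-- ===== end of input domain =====

-- B replaces A's index-rewinding loop (repeated list.pop) by a single stack pass; A mutates
-- its argument in place while B does not — the equivalence proved here is about the return value only.

-- Opposite polarity test shared by both ports: `a != b and a.lower() == b.lower()`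
def pvReacts (a b : String) : Bool := a != b && (PySem.Str.lower a == PySem.Str.lower b)

-- ===== PORT A =====
-- the while loop of A: state (list, index, polymerSize); pops via PySem.List.pop?
def reactA_loop (l : List String) (index size : Int) : Int :=
  if _h : index < size - 1 then
    let i := if index < 0 then 0 else index
    match PySem.List.pyGet? l i, PySem.List.pyGet? l (i + 1) with
    | some a, some b =>
        if pvReacts a b then
          match PySem.List.pop? l i with
          | some (_, l1) =>
              (match PySem.List.pop? l1 i with
               | some (_, l2) => reactA_loop l2 (i - 2 + 1) (size - 2)
               | none => 0)  -- unreachable when the first pop succeeded on a list of ≥ 2 from i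
          | none => 0        -- unreachable: i is in range here
        else reactA_loop l (i + 1) size
    | _, _ => 0              -- Python raises IndexError here; excluded by Pre_
  else size
termination_by (size + 1 - index).toNat
decreasing_by all_goals (split <;> omega)

def react_polymers (polymerList : List String) : Int :=
  reactA_loop polymerList 0 (polymerList.length : Int)

-- ===== PORT B =====
-- B's stack is kept head-first (head = Python's stack[-1])
def pvStep (stack : List String) (unit : String) : List String :=
  match stack with
  | [] => [unit]
  | top :: rest => if pvReacts top unit then rest else unit :: top :: rest

def react_polymers_alt (polymerList : List String) : Int :=
  ((polymerList.foldl pvStep []).length : Int)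

-- ===== PRECONDITION & SPEC =====
-- Pre_ excludes exactly the inputs on which A raises IndexError: lists of length ≥ 2 whose first
-- n-1 units annihilate completely (the last pop leaves index = -1 and a single unit, and the
-- clamped re-check reads polymerList[1] past the end).
def Pre_react_polymers (polymerList : List String) : Prop :=
  ¬ (2 ≤ polymerList.length ∧ polymerList.dropLast.foldl pvStep [] = [])
instance (polymerList : List String) : Decidable (Pre_react_polymers polymerList) := by
  unfold Pre_react_polymers; infer_instance

def pvWitness_react_polymers : List String := ["d", "a", "b", "A", "c", "C", "B", "D", "x"]

-- A raises IndexError exactly on lists of length ≥ 2 whose first n-1 units annihilate completely; B returns the correct reduced size (1) there.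
def Raises_react_polymers (polymerList : List String) : Prop :=
  2 ≤ polymerList.length ∧ polymerList.dropLast.foldl pvStep [] = []
instance (polymerList : List String) : Decidable (Raises_react_polymers polymerList) := by
  unfold Raises_react_polymers; infer_instance
def pvRaiseWitness_react_polymers : List String := ["a", "A", "x"]
def pvRaiseWitnessOut_react_polymers : Int := 1

def Spec_react_polymers (polymerList : List String) (out : Int) : Prop := out = react_polymers_alt polymerList
instance (polymerList : List String) (out : Int) : Decidable (Spec_react_polymers polymerList out) := by unfold Spec_react_polymers; infer_instance

-- ===== CLAIM (what is proved, stated in full; the proofs are below) =====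
def Claim_equal_react_polymers : Prop := ∀ (polymerList : List String), Dom_react_polymers polymerList → Pre_react_polymers polymerList → Spec_react_polymers polymerList (react_polymers polymerList)

def Claim_raises_react_polymers : Prop := (∀ (polymerList : List String), Dom_react_polymers polymerList → Raises_react_polymers polymerList → ¬ Pre_react_polymers polymerList) ∧ (Dom_react_polymers (pvRaiseWitness_react_polymers) ∧ Raises_react_polymers (pvRaiseWitness_react_polymers) ∧ react_polymers_alt (pvRaiseWitness_react_polymers) = pvRaiseWitnessOut_react_polymers)


-- ===== LEMMAS AND PROOFS =====

-- (l1 ++ x :: l2).eraseIdx at position l1.length removes x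
theorem pv_eraseIdx_append {α : Type} (l1 l2 : List α) (x : α) :
    (l1 ++ x :: l2).eraseIdx l1.length = l1 ++ l2 := by
  induction l1 with
  | nil => simp
  | cons a l ih => simp [List.eraseIdx_cons_succ, ih]

theorem pv_pyGet?_one {α : Type} (a b : α) (l : List α) :
    PySem.List.pyGet? (a :: b :: l) ((0:Int) + 1) = some b := by
  rw [show a :: b :: l = [a] ++ b :: l from rfl,
      show ((0:Int) + 1) = ((List.length [a] : Nat) : Int) by simp,
      PySem.List.pyGet?_append_length]

-- the no-crash condition propagates along one stack step
theorem pv_cond_step (u : List String) (q : String) (w : List String)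
    (hc : ¬ ((q :: w) ≠ [] ∧ (q :: w).dropLast.foldl pvStep u = [])) :
    ¬ (w ≠ [] ∧ w.dropLast.foldl pvStep (pvStep u q) = []) := by
  rintro ⟨h1, h2⟩
  apply hc
  obtain ⟨c, cs, rfl⟩ := List.exists_cons_of_ne_nil h1
  exact ⟨by simp, by simpa [List.dropLast_cons₂] using h2⟩

-- Invariant: A's loop state (list, index, size) always has the shape
-- (stack.reverse ++ rest, stack.length - 1, stack.length + rest.length); on such a state the loop
-- returns the length of B's stack fold, provided the crash state (A's pop at index 0 leaving a
-- single unit) is never reached, i.e. unless rest.dropLast folds the stack down to [].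
theorem reactA_loop_eq (n : Nat) : ∀ (rest stack : List String), rest.length ≤ n →
    ¬ (rest ≠ [] ∧ rest.dropLast.foldl pvStep stack = []) →
    reactA_loop (stack.reverse ++ rest) ((stack.length : Int) - 1) ((stack.length : Int) + (rest.length : Int))
      = (((rest.foldl pvStep stack).length : Nat) : Int) := by
  induction n with
  | zero =>
    intro rest stack hlen _hc
    have hr : rest = [] := by cases rest <;> simp_all
    subst hr
    rw [reactA_loop, dif_neg (by push_cast [List.length_nil]; omega)]
    simp
  | succ m ih =>
    intro rest stack hlen hc
    match rest, stack with
    | [], stack =>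
      rw [reactA_loop, dif_neg (by push_cast [List.length_nil]; omega)]
      simp
    | p :: r, [] =>
      rw [reactA_loop, dif_pos (by push_cast [List.length_cons]; omega)]
      simp only [List.length_nil, Nat.cast_zero, zero_sub, List.reverse_nil, List.nil_append,
        List.length_cons, Nat.cast_add, Nat.cast_one]
      rw [if_pos (by omega)]
      rw [PySem.List.pyGet?_zero_cons]
      match r with
      | [] =>
        exact absurd ⟨by simp, by simp⟩ hc
      | x :: r' =>
        rw [pv_pyGet?_one]
        dsimp only
        have hc1 := pv_cond_step _ x _ (pv_cond_step _ p _ hc)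
        by_cases hpx : pvReacts p x = true
        · rw [if_pos hpx]
          rw [PySem.List.pop?_zero_cons]
          dsimp only
          rw [PySem.List.pop?_zero_cons]
          dsimp only
          simp only [pvStep, hpx, if_pos] at hc1
          have hres := ih r' [] (by simp at hlen; omega) hc1
          convert hres using 2 <;>
            first
              | (push_cast [List.length_cons, List.length_nil, List.length_reverse]; omega)
              | (simp [pvStep, hpx])
        · rw [if_neg hpx]
          simp only [pvStep, hpx, Bool.false_eq_true, if_false] at hc1
          have hres := ih r' [x, p] (by simp at hlen ⊢; omega) hc1
          convert hres using 2 <;>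
            first
              | (push_cast [List.length_cons, List.length_nil, List.length_reverse]; omega)
              | (simp [pvStep, hpx])
    | p :: r, t :: ts =>
      rw [reactA_loop, dif_pos (by push_cast [List.length_cons]; omega)]
      simp only [List.length_cons, Nat.cast_add, Nat.cast_one, List.reverse_cons,
        List.append_assoc, List.cons_append, List.nil_append]
      rw [if_neg (by omega)]
      rw [show (↑ts.length + (1:Int) - 1) = ↑ts.reverse.length by simp]
      rw [PySem.List.pyGet?_append_length]
      rw [show (↑ts.reverse.length + (1:Int)) = ↑(ts.reverse ++ [t]).length by simp]
      rw [show ts.reverse ++ t :: p :: r = (ts.reverse ++ [t]) ++ p :: r by simp]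
      rw [PySem.List.pyGet?_append_length]
      dsimp only
      have hc1 := pv_cond_step _ p _ hc
      have hlen' : r.length ≤ m := by simp at hlen; omega
      by_cases hr : pvReacts t p = true
      · rw [if_pos hr]
        rw [show (ts.reverse ++ [t]) ++ p :: r = ts.reverse ++ t :: p :: r by simp]
        rw [PySem.List.pop?_natCast _ _ (by simp)]
        rw [show (ts.reverse ++ t :: p :: r).eraseIdx ts.reverse.length = ts.reverse ++ p :: r from
          pv_eraseIdx_append ts.reverse (p :: r) t]
        dsimp only
        rw [PySem.List.pop?_natCast _ _ (by simp)]
        rw [show (ts.reverse ++ p :: r).eraseIdx ts.reverse.length = ts.reverse ++ r from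
          pv_eraseIdx_append ts.reverse r p]
        dsimp only
        simp only [pvStep, hr, if_pos] at hc1
        have hres := ih r ts hlen' hc1
        convert hres using 2 <;>
            first
              | (push_cast [List.length_cons, List.length_nil, List.length_reverse]; omega)
              | (simp [pvStep, hr])
      · rw [if_neg hr]
        simp only [pvStep, hr, Bool.false_eq_true, if_false] at hc1
        have hres := ih r (p :: t :: ts) hlen' hc1
        convert hres using 2 <;>
            first
              | (push_cast [List.length_cons, List.length_nil, List.length_reverse]; omega)
              | (simp [pvStep, hr])

-- ===== VERDICT (by name: the statement is the Claim_ definition above) =====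
theorem react_polymers_spec : Claim_equal_react_polymers := by
  intro l _hdom hpre
  unfold Spec_react_polymers react_polymers react_polymers_alt
  match l with
  | [] =>
    rw [reactA_loop, dif_neg (by norm_num)]
    simp
  | p :: r =>
    have hcond : ¬ (r ≠ [] ∧ r.dropLast.foldl pvStep [p] = []) := by
      rintro ⟨h1, h2⟩
      apply hpre
      obtain ⟨c, cs, rfl⟩ := List.exists_cons_of_ne_nil h1
      refine ⟨by simp, ?_⟩
      simpa [List.dropLast_cons₂, pvStep] using h2
    have h := reactA_loop_eq r.length r [p] le_rfl hcond
    convert h using 2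
    push_cast [List.length_cons, List.length_nil, List.length_reverse]
    omega

@[simp]
theorem react_polymers_raises : Claim_raises_react_polymers := by
  unfold Claim_raises_react_polymers
  exact ⟨fun _ _ hr hp => hp hr, by decide⟩
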